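-- pv_equiv track=rewrite | github.com/PokamCedric/eraser-ts | python_test/algorithm/graph_preprocessor.py | build_entity_order
-- ===== SOURCE A (Python) =====
-- from typing import List, Tuple
-- from collections import defaultdict
--
-- def build_entity_order(relations: List[Tuple[str, str]]) -> List[str]:
--     """
--     Build entity processing order based on connectivity
--
--     Algorithm:
--     1. Sort by connection count (descending)
--     2. Breadth-first expansion from most connected
--     3. Tie-breaker: position in connectivity ranking
--     """
--     # Count connections per entity
--     connection_count = defaultdict(int)
--     for a, b in relations:
--         connection_count[a] += 1
--         connection_count[b] += 1
--
--     # Rule 1: Sort by connectivity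
--     connectivity_ranking = sorted(
--         connection_count.keys(),
--         key=lambda x: connection_count[x],
--         reverse=True
--     )
--
--     # Start with most connected entity
--     entity_order = []
--     frontier = []
--
--     if connectivity_ranking:
--         entity_order.append(connectivity_ranking[0])
--
--         # Initialize frontier with neighbors of first entity
--         for a, b in relations:
--             if a == entity_order[0] and b not in frontier:
--                 frontier.append(b)
--             if b == entity_order[0] and a not in frontier:
--                 frontier.append(a)
--
--     # Rule 2: Breadth-first expansion with connectivity tie-breaker
--     while len(entity_order) < len(connectivity_ranking):
--         candidates = [e for e in frontier if e not in entity_order]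
--
--         if not candidates:
--             # No more in frontier, pick from unvisited
--             candidates = [e for e in connectivity_ranking if e not in entity_order]
--             if not candidates:
--                 break
--
--         # Rule 3: Tie-breaker by connectivity ranking
--         next_entity = max(
--             candidates,
--             key=lambda e: (
--                 connection_count[e],
--                 -connectivity_ranking.index(e)
--             )
--         )
--
--         entity_order.append(next_entity)
--
--         # Expand frontier with neighbors
--         for a, b in relations:
--             if a == next_entity and b not in frontier and b not in entity_order:
--                 frontier.append(b)
--             if b == next_entity and a not in frontier and a not in entity_order:
--                 frontier.append(a)
--
--     return entity_order
-- ===== SOURCE B (Python) =====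
-- from typing import List, Tuple
--
-- def build_entity_order(relations: List[Tuple[str, str]]) -> List[str]:
--     # Count connections (insertion order = first appearance)
--     count = {}
--     for a, b in relations:
--         count[a] = count.get(a, 0) + 1
--         count[b] = count.get(b, 0) + 1
--
--     ranking = sorted(count, key=count.get, reverse=True)
--     rank = {e: i for i, e in enumerate(ranking)}
--
--     # Adjacency lists, built once
--     adj = {e: [] for e in ranking}
--     for a, b in relations:
--         adj[a].append(b)
--         adj[b].append(a)
--
--     order = []
--     visited = set()
--     frontier = set()
--     for _ in range(len(ranking)):
--         cand = frontier - visited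
--         if cand:
--             nxt = min(cand, key=rank.get)
--         else:
--             nxt = next(e for e in ranking if e not in visited)
--         order.append(nxt)
--         visited.add(nxt)
--         frontier.update(adj[nxt])
--     return order
-- ===== Notes on version B (the rewrite author's own statement) =====
-- stated objective: faster
-- what changed: Replaces the per-step rescans (list membership in frontier/order, repeated relation scans for neighbours, ranking.index inside the max key) by structures built once - an adjacency dict, a rank dict, visited/frontier sets - and picks the next entity as the min-rank candidate, which equals A's max by (count, -rank) because the ranking is sorted by count.
import Mathlib
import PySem

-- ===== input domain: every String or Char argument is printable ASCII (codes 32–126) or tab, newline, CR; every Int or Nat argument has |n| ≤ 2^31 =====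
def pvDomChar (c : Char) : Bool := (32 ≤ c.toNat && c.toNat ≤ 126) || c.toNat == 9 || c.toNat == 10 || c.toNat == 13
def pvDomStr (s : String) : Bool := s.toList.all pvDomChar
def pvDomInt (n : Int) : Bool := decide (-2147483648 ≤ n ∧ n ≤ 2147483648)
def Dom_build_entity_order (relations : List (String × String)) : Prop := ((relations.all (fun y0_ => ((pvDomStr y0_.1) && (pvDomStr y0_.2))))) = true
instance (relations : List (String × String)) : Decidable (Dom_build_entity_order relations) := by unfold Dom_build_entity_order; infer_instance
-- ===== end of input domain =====

-- B replaces A's per-step rescans (list membership, repeated relation scans, ranking.index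
-- in the max key) by an adjacency dict, a rank dict and visited/frontier sets, picking the
-- min-rank candidate (equal to A's max by (count, -rank) since the ranking is count-sorted); faster.

-- ===== PORT A =====
-- the 'while' loop of A; 'break' is the none arm of the match
def pvLoopA (relations : List (String × String)) (count : PySem.Dict String Int)
    (ranking : List String) (order frontier : List String) : List String :=
  if h : order.length < ranking.length then
    let cand0 := frontier.filter (fun e => !order.contains e)
    let cand := if cand0.isEmpty then ranking.filter (fun e => !order.contains e) else cand0
    -- key (connection_count[e], -connectivity_ranking.index(e)); index never raises here
    match PySem.List.max2? cand (fun e => count.getD e 0)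
        (fun e => -(((PySem.List.index? ranking e).getD 0 : Nat) : Int)) with
    | none => order
    | some nxt =>
      let order' := order ++ [nxt]
      let frontier' := relations.foldl (fun f p =>
        let f := if p.1 == nxt && !f.contains p.2 && !order'.contains p.2 then f ++ [p.2] else f
        if p.2 == nxt && !f.contains p.1 && !order'.contains p.1 then f ++ [p.1] else f) frontier
      pvLoopA relations count ranking order' frontier'
  else order
termination_by ranking.length - order.length
decreasing_by simp only [List.length_append, List.length_cons, List.length_nil]; omega

def build_entity_order (relations : List (String × String)) : List String :=
  let count := relations.foldl (fun d p =>
      (d.modify p.1 (0 : Int) (· + 1)).modify p.2 (0 : Int) (· + 1)) PySem.Dict.empty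
  let ranking := PySem.List.sorted count.keys (fun x => count.getD x 0) true
  match ranking with
  | [] => pvLoopA relations count ranking [] []
  | e0 :: _ =>
    let frontier := relations.foldl (fun f p =>
      let f := if p.1 == e0 && !f.contains p.2 then f ++ [p.2] else f
      if p.2 == e0 && !f.contains p.1 then f ++ [p.1] else f) []
    pvLoopA relations count ranking [e0] frontier

-- ===== PORT B =====
-- the 'for _ in range(len(ranking))' loop of B; the none arm is Python's unreachable
-- StopIteration of next(...)
def pvLoopB (rank : PySem.Dict String Int) (adj : PySem.Dict String (List String))
    (ranking : List String) : Nat → List String → PySem.Set String → PySem.Set String → List String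
  | 0, order, _, _ => order
  | k + 1, order, visited, frontier =>
    let cand := PySem.Set.diff frontier visited
    match (if cand.isEmpty then ranking.find? (fun e => !(PySem.Set.contains visited e))
           else PySem.List.min? cand (fun e => rank.getD e 0)) with
    | none => order
    | some nxt =>
      pvLoopB rank adj ranking k (order ++ [nxt]) (PySem.Set.add visited nxt)
        (PySem.Set.update frontier (adj.getD nxt []))

def build_entity_order_alt (relations : List (String × String)) : List String :=
  let count := relations.foldl (fun d p =>
      let d := d.insert p.1 (d.getD p.1 0 + 1)
      d.insert p.2 (d.getD p.2 0 + 1)) (PySem.Dict.empty : PySem.Dict String Int)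
  let ranking := PySem.List.sorted count.keys (fun x => count.getD x 0) true
  let rank := (PySem.List.enumerate ranking).foldl (fun d p => d.insert p.2 p.1) PySem.Dict.empty
  let adj0 := ranking.foldl (fun d e => d.insert e ([] : List String)) PySem.Dict.empty
  let adj := relations.foldl (fun d p =>
      let d := d.modify p.1 [] (· ++ [p.2])
      d.modify p.2 [] (· ++ [p.1])) adj0
  pvLoopB rank adj ranking ranking.length [] PySem.Set.empty PySem.Set.empty

-- ===== PRECONDITION & SPEC =====
def Spec_build_entity_order (relations : List (String × String)) (out : List String) : Prop := out = build_entity_order_alt relations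
instance (relations : List (String × String)) (out : List String) : Decidable (Spec_build_entity_order relations out) := by unfold Spec_build_entity_order; infer_instance

-- ===== CLAIM (what is proved, stated in full; the proofs are below) =====
def Claim_equal_build_entity_order : Prop := ∀ (relations : List (String × String)), Dom_build_entity_order relations → Spec_build_entity_order relations (build_entity_order relations)

-- ===== LEMMAS AND PROOFS =====

-- both orientations of every relation, in A's scan order
def pvFlat (rels : List (String × String)) : List (String × String) :=
  rels.flatMap (fun p => [(p.1, p.2), (p.2, p.1)])

def pvCount (rels : List (String × String)) : PySem.Dict String Int :=
  rels.foldl (fun d p => (d.modify p.1 (0 : Int) (· + 1)).modify p.2 (0 : Int) (· + 1)) PySem.Dict.empty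

def pvRanking (rels : List (String × String)) : List String :=
  PySem.List.sorted (pvCount rels).keys (fun x => (pvCount rels).getD x 0) true

def pvIdx (ranking : List String) (e : String) : Nat := (PySem.List.index? ranking e).getD 0

def pvAdjSeq (rels : List (String × String)) (e : String) : List String :=
  ((pvFlat rels).filter (fun q => q.1 == e)).map (·.2)

-- a per-pair double step is a fold over pvFlat
theorem pv_foldl_pairs {σ : Type} (f : σ → String × String → σ) (g : σ → String × String → σ)
    (hg : ∀ s p, g s p = f (f s (p.1, p.2)) (p.2, p.1)) (rels : List (String × String)) (s : σ) :
    rels.foldl g s = (pvFlat rels).foldl f s := by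
  induction rels generalizing s with
  | nil => rfl
  | cons p T ih =>
    rw [List.foldl_cons, hg]
    have hfl : pvFlat (p :: T) = (p.1, p.2) :: (p.2, p.1) :: pvFlat T := by simp [pvFlat]
    rw [hfl, List.foldl_cons, List.foldl_cons]
    exact ih _

theorem pv_count_eq (rels : List (String × String)) :
    pvCount rels = (pvFlat rels).foldl (fun d q => d.modify q.1 (0 : Int) (· + 1)) PySem.Dict.empty := by
  unfold pvCount
  exact pv_foldl_pairs (fun d q => d.modify q.1 (0 : Int) (· + 1)) _ (fun _ _ => rfl) rels PySem.Dict.empty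

theorem pv_keys_count (rels : List (String × String)) :
    (pvCount rels).keys = PySem.Set.ofList ((pvFlat rels).map (·.1)) := by
  rw [pv_count_eq]
  rw [PySem.Dict.keys_foldl_modify_key (pvFlat rels) (·.1) (0 : Int) (fun _ _ => (· + 1)) PySem.Dict.empty]
  exact PySem.Set.update_nil_left _

theorem pv_ranking_nodup (rels : List (String × String)) : (pvRanking rels).Nodup := by
  have h1 : (pvCount rels).keys.Nodup := by
    rw [pv_keys_count]; exact PySem.Set.nodup_ofList _
  exact ((PySem.List.sorted_perm _ _ _).symm).nodup h1

theorem pv_mem_ranking (rels : List (String × String)) (e : String) :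
    e ∈ pvRanking rels ↔ e ∈ (pvFlat rels).map (·.1) := by
  unfold pvRanking
  rw [PySem.List.mem_sorted, pv_keys_count, PySem.Set.mem_ofList]

theorem pv_adjseq_mem_ranking (rels : List (String × String)) (x t : String)
    (ht : t ∈ pvAdjSeq rels x) : t ∈ pvRanking rels := by
  rw [pv_mem_ranking]
  simp only [pvAdjSeq, List.mem_map, List.mem_filter] at ht
  obtain ⟨q, ⟨hq, hq1⟩, hq2⟩ := ht
  simp only [pvFlat, List.mem_flatMap, List.mem_cons, List.mem_map] at hq ⊢
  obtain ⟨p, hp, hmem⟩ := hq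
  refine ⟨(q.2, q.1), ⟨p, hp, ?_⟩, hq2⟩
  rcases hmem with h | h | h
  · subst h; exact Or.inr (Or.inl rfl)
  · subst h; exact Or.inl rfl
  · simp at h

theorem pv_ranking_desc (rels : List (String × String)) :
    (pvRanking rels).Pairwise (fun a b => (pvCount rels).getD b 0 ≤ (pvCount rels).getD a 0) := by
  exact PySem.List.sorted_pairwise_rev _ _

-- index facts on a Nodup list
theorem pv_idx_getElem (ranking : List String) (e : String) (he : e ∈ ranking) :
    ∃ hk : pvIdx ranking e < ranking.length, ranking[pvIdx ranking e] = e := by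
  have hs : e ∈ ranking := he
  rw [← PySem.List.index?_isSome_iff] at hs
  obtain ⟨k, hk⟩ := Option.isSome_iff_exists.mp hs
  obtain ⟨h1, h2, _⟩ := PySem.List.getElem_of_index?_eq_some hk
  have hpv : pvIdx ranking e = k := by unfold pvIdx; rw [hk]; rfl
  rw [hpv]; exact ⟨h1, h2⟩

theorem pv_idx_inj (ranking : List String) (hnd : ranking.Nodup) (a b : String)
    (ha : a ∈ ranking) (hb : b ∈ ranking) (h : pvIdx ranking a = pvIdx ranking b) : a = b := by
  obtain ⟨ha1, ha2⟩ := pv_idx_getElem ranking a ha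
  obtain ⟨hb1, hb2⟩ := pv_idx_getElem ranking b hb
  have ha3 : ranking[pvIdx ranking a]? = some a := by rw [List.getElem?_eq_getElem ha1, ha2]
  have hb3 : ranking[pvIdx ranking b]? = some b := by rw [List.getElem?_eq_getElem hb1, hb2]
  rw [h] at ha3
  exact Option.some_injective _ (ha3.symm.trans hb3)

theorem pv_idx_getElem_self (ranking : List String) (hnd : ranking.Nodup) (i : Nat)
    (hi : i < ranking.length) : pvIdx ranking ranking[i] = i := by
  obtain ⟨hk, he⟩ := pv_idx_getElem ranking ranking[i] (List.getElem_mem hi)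
  exact (List.Nodup.getElem_inj_iff hnd).mp he

theorem pv_idx_pairwise (ranking : List String) (hnd : ranking.Nodup) :
    ranking.Pairwise (fun a b => pvIdx ranking a < pvIdx ranking b) := by
  rw [List.pairwise_iff_getElem]
  intro i j hi hj hij
  rw [pv_idx_getElem_self ranking hnd i hi, pv_idx_getElem_self ranking hnd j hj]
  exact hij

theorem pv_idx_lt_count (rels : List (String × String)) (a b : String)
    (ha : a ∈ pvRanking rels) (hb : b ∈ pvRanking rels)
    (h : pvIdx (pvRanking rels) a < pvIdx (pvRanking rels) b) :
    (pvCount rels).getD b 0 ≤ (pvCount rels).getD a 0 := by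
  have hd := pv_ranking_desc rels
  rw [List.pairwise_iff_getElem] at hd
  obtain ⟨hak, hae⟩ := pv_idx_getElem _ a ha
  obtain ⟨hbk, hbe⟩ := pv_idx_getElem _ b hb
  have := hd _ _ hak hbk h
  rw [hae, hbe] at this
  exact this

theorem pv_lex_trans1 {α κ₁ κ₂ : Type} [LinearOrder κ₁] [LinearOrder κ₂]
    (k1 : α → κ₁) (k2 : α → κ₂) (a x m : α)
    (hax : k1 a < k1 x ∨ (k1 a ≤ k1 x ∧ k2 a < k2 x))
    (hxm : k1 x < k1 m ∨ (¬ k1 m < k1 x ∧ k2 x ≤ k2 m)) :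
    k1 a < k1 m ∨ (¬ k1 m < k1 a ∧ k2 a ≤ k2 m) := by
  rcases hax with h | ⟨h1, h2⟩
  · rcases hxm with h' | ⟨h1', _⟩
    · exact Or.inl (h.trans h')
    · exact Or.inl (lt_of_lt_of_le h (not_lt.mp h1'))
  · rcases hxm with h' | ⟨h1', h2'⟩
    · exact Or.inl (lt_of_le_of_lt h1 h')
    · exact Or.inr ⟨not_lt.mpr (le_trans h1 (not_lt.mp h1')), le_trans h2.le h2'⟩

theorem pv_lex_trans2 {α κ₁ κ₂ : Type} [LinearOrder κ₁] [LinearOrder κ₂]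
    (k1 : α → κ₁) (k2 : α → κ₂) (a x m : α)
    (hxa : k1 x ≤ k1 a ∧ (k1 a ≤ k1 x → k2 x ≤ k2 a))
    (ham : k1 a < k1 m ∨ (¬ k1 m < k1 a ∧ k2 a ≤ k2 m)) :
    k1 x < k1 m ∨ (¬ k1 m < k1 x ∧ k2 x ≤ k2 m) := by
  obtain ⟨hle, himp⟩ := hxa
  rcases ham with h | ⟨h1, h2⟩
  · exact Or.inl (lt_of_le_of_lt hle h)
  · by_cases hlt : k1 x < k1 a
    · exact Or.inl (lt_of_lt_of_le hlt (not_lt.mp h1))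
    · exact Or.inr ⟨not_lt.mpr (le_trans hle (not_lt.mp h1)), le_trans (himp (not_lt.mp hlt)) h2⟩

theorem pv_max2_aux {α κ₁ κ₂ : Type} [LinearOrder κ₁] [LinearOrder κ₂]
    (k1 : α → κ₁) (k2 : α → κ₂) (xs : List α) :
    ∀ (acc : Option α) (m : α),
      xs.foldl (fun acc x =>
        match acc with
        | none => some x
        | some mm =>
          if (decide (k1 mm < k1 x) || !decide (k1 x < k1 mm) && decide (k2 mm < k2 x)) = true
          then some x else some mm) acc = some m →
      (∀ a, acc = some a → (k1 a < k1 m ∨ (¬ k1 m < k1 a ∧ k2 a ≤ k2 m))) ∧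
      (∀ y ∈ xs, k1 y < k1 m ∨ (¬ k1 m < k1 y ∧ k2 y ≤ k2 m)) ∧
      (acc = some m ∨ m ∈ xs) := by
  induction xs with
  | nil =>
    intro acc m h
    simp only [List.foldl_nil] at h
    subst h
    refine ⟨?_, by simp, Or.inl rfl⟩
    intro a ha
    injection ha with ha; subst ha
    exact Or.inr ⟨lt_irrefl _, le_rfl⟩
  | cons x t ih =>
    intro acc m h
    rw [List.foldl_cons] at h
    obtain ⟨hacc, hall, hmem⟩ := ih _ m h
    cases acc with
    | none =>
      have hx := hacc x rfl
      refine ⟨?_, fun y hy => ?_, Or.inr ?_⟩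
      · intro a ha; exact absurd ha (by simp)
      · rcases List.mem_cons.mp hy with rfl | hy'
        · exact hx
        · exact hall y hy'
      · rcases hmem with hm | hm
        · exact List.mem_cons.mpr (Or.inl (by injection hm with hm; exact hm.symm))
        · exact List.mem_cons.mpr (Or.inr hm)
    | some a =>
      have hred : ∀ (b : Bool), (decide (k1 a < k1 x) || !decide (k1 x < k1 a) && decide (k2 a < k2 x)) = b →
          (match some a with
            | none => some x
            | some mm =>
              if (decide (k1 mm < k1 x) || !decide (k1 x < k1 mm) && decide (k2 mm < k2 x)) = true
              then some x else some mm : Option α) = (if b = true then some x else some a) := by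
        intro b hb; rw [← hb]
      by_cases hc : (decide (k1 a < k1 x) || !decide (k1 x < k1 a) && decide (k2 a < k2 x)) = true
      · have hstep := hred true hc
        rw [if_pos rfl] at hstep
        rw [hstep] at hacc hmem
        have hx := hacc x rfl
        have hc' : k1 a < k1 x ∨ (k1 a ≤ k1 x ∧ k2 a < k2 x) := by simpa using hc
        refine ⟨?_, fun y hy => ?_, ?_⟩
        · intro b hb
          obtain rfl : a = b := by injection hb
          exact pv_lex_trans1 k1 k2 a x m hc' hx
        · rcases List.mem_cons.mp hy with rfl | hy'
          · exact hx
          · exact hall y hy'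
        · rcases hmem with hm | hm
          · exact Or.inr (List.mem_cons.mpr (Or.inl (by injection hm with hm; exact hm.symm)))
          · exact Or.inr (List.mem_cons.mpr (Or.inr hm))
      · have hstep := hred false (by simpa using hc)
        rw [if_neg (by simp)] at hstep
        rw [hstep] at hacc hmem
        have ha := hacc a rfl
        have hc' : k1 x ≤ k1 a ∧ (k1 a ≤ k1 x → k2 x ≤ k2 a) := by simpa using hc
        refine ⟨?_, fun y hy => ?_, ?_⟩
        · intro b hb
          obtain rfl : a = b := by injection hb
          exact ha
        · rcases List.mem_cons.mp hy with rfl | hy'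
          · exact pv_lex_trans2 k1 k2 a y m hc' ha
          · exact hall y hy'
        · rcases hmem with hm | hm
          · exact Or.inl (by injection hm with hm; rw [hm])
          · exact Or.inr (List.mem_cons.mpr (Or.inr hm))

-- max2? characterisation (first maximal element, lexicographic tuple key)
theorem pv_max2_mem {α κ₁ κ₂ : Type} [LinearOrder κ₁] [LinearOrder κ₂]
    (xs : List α) (k1 : α → κ₁) (k2 : α → κ₂) (m : α)
    (h : PySem.List.max2? xs k1 k2 = some m) : m ∈ xs := by
  have h' := h
  unfold PySem.List.max2? at h'
  obtain ⟨_, _, hmem⟩ := pv_max2_aux k1 k2 xs none m h'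
  rcases hmem with hm | hm
  · exact absurd hm (by simp)
  · exact hm

theorem pv_max2_isMax {α κ₁ κ₂ : Type} [LinearOrder κ₁] [LinearOrder κ₂]
    (xs : List α) (k1 : α → κ₁) (k2 : α → κ₂) (m : α)
    (h : PySem.List.max2? xs k1 k2 = some m) :
    ∀ y ∈ xs, k1 y < k1 m ∨ (¬ k1 m < k1 y ∧ k2 y ≤ k2 m) := by
  have h' := h
  unfold PySem.List.max2? at h'
  obtain ⟨_, hall, _⟩ := pv_max2_aux k1 k2 xs none m h'
  exact hall

theorem pv_max2_ne_none {α κ₁ κ₂ : Type} [LinearOrder κ₁] [LinearOrder κ₂]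
    (xs : List α) (k1 : α → κ₁) (k2 : α → κ₂) (hne : xs ≠ []) :
    PySem.List.max2? xs k1 k2 ≠ none := by
  cases xs with
  | nil => exact absurd rfl hne
  | cons x t =>
    unfold PySem.List.max2?
    rw [List.foldl_cons]
    have : ∀ (l : List α) (a : α),
        l.foldl (fun acc x =>
          match acc with
          | none => some x
          | some mm =>
            if (decide (k1 mm < k1 x) || !decide (k1 x < k1 mm) && decide (k2 mm < k2 x)) = true
            then some x else some mm) (some a) ≠ none := by
      intro l
      induction l with
      | nil => intro a h; cases h
      | cons y l' ih =>
        intro a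
        rw [List.foldl_cons]
        by_cases hc : (decide (k1 a < k1 y) || !decide (k1 y < k1 a) && decide (k2 a < k2 y)) = true
        · simpa [hc] using ih y
        · simpa [hc] using ih a
    exact this t x

theorem pv_min_ne_none {α κ : Type} [LinearOrder κ] (xs : List α) (key : α → κ) (hne : xs ≠ []) :
    PySem.List.min? xs key ≠ none := by
  intro h
  rw [PySem.List.min?_eq_none_iff] at h
  exact hne h

theorem pv_rank_aux1 (t : List String) (e : String) :
    ∀ (s : Int) (d : PySem.Dict String Int), e ∉ t →
      ((PySem.List.enumerate t s).foldl (fun d p => d.insert p.2 p.1) d).getD e 0 = d.getD e 0 := by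
  induction t with
  | nil => intro s d _; rfl
  | cons x t' ih =>
    intro s d he
    have henum : PySem.List.enumerate (x :: t') s = (s, x) :: PySem.List.enumerate t' (s + 1) := by
      simp [PySem.List.enumerate]
    rw [henum, List.foldl_cons]
    rw [ih (s + 1) _ (fun h => he (List.mem_cons.mpr (Or.inr h)))]
    exact PySem.Dict.getD_insert_of_ne d s 0 (fun h => he (List.mem_cons.mpr (Or.inl h)))

theorem pv_rank_aux2 (t : List String) (e : String) :
    t.Nodup → e ∈ t → ∀ (s : Int) (d : PySem.Dict String Int),
      ((PySem.List.enumerate t s).foldl (fun d p => d.insert p.2 p.1) d).getD e 0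
        = s + (((PySem.List.index? t e).getD 0 : Nat) : Int) := by
  induction t with
  | nil => intro _ he; exact absurd he (by simp)
  | cons x t' ih =>
    intro hnd he s d
    have henum : PySem.List.enumerate (x :: t') s = (s, x) :: PySem.List.enumerate t' (s + 1) := by
      simp [PySem.List.enumerate]
    rw [henum, List.foldl_cons]
    by_cases hex : e = x
    · subst hex
      have hnotin : e ∉ t' := (List.nodup_cons.mp hnd).1
      rw [pv_rank_aux1 t' e (s + 1) _ hnotin]
      rw [PySem.List.index?_cons_self]
      simp [PySem.Dict.getD_insert_self]
    · have he' : e ∈ t' := by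
        rcases List.mem_cons.mp he with h | h
        · exact absurd h hex
        · exact h
      rw [ih (List.nodup_cons.mp hnd).2 he' (s + 1) _]
      rw [PySem.List.index?_cons_of_ne _ (fun h => hex h.symm)]
      obtain ⟨k, hk⟩ := Option.isSome_iff_exists.mp
        (by rw [PySem.List.index?_isSome_iff]; exact he' :
          (PySem.List.index? t' e).isSome = true)
      rw [hk]
      simp only [Option.map_some, Option.getD_some]
      push_cast
      ring

-- B's rank dict looks up the position in ranking
theorem pv_rank_getD (ranking : List String) (hnd : ranking.Nodup) (e : String) (he : e ∈ ranking) :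
    ((PySem.List.enumerate ranking).foldl (fun d p => d.insert p.2 p.1) PySem.Dict.empty).getD e 0
      = (pvIdx ranking e : Int) := by
  rw [pv_rank_aux2 ranking e hnd he 0 PySem.Dict.empty]
  unfold pvIdx
  simp

theorem pv_adj_base (e : String) : ∀ (l : List String) (d : PySem.Dict String (List String)),
    d.getD e [] = [] → (l.foldl (fun d x => d.insert x ([] : List String)) d).getD e [] = [] := by
  intro l
  induction l with
  | nil => intro d h; exact h
  | cons x t ih =>
    intro d h
    rw [List.foldl_cons]
    apply ih
    by_cases hex : e = x
    · rw [hex]; exact PySem.Dict.getD_insert_self d x [] []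
    · rw [PySem.Dict.getD_insert_of_ne d [] [] hex]; exact h

-- B's adjacency dict stores pvAdjSeq
theorem pv_adj_getD (rels : List (String × String)) (ranking : List String) (e : String) :
    (rels.foldl (fun d p =>
        (d.modify p.1 ([] : List String) (· ++ [p.2])).modify p.2 [] (· ++ [p.1]))
      (ranking.foldl (fun d x => d.insert x ([] : List String)) PySem.Dict.empty)).getD e []
      = pvAdjSeq rels e := by
  have step1 : rels.foldl (fun d p =>
        (d.modify p.1 ([] : List String) (· ++ [p.2])).modify p.2 [] (· ++ [p.1]))
      (ranking.foldl (fun d x => d.insert x ([] : List String)) PySem.Dict.empty)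
      = (pvFlat rels).foldl (fun d q => d.modify q.1 ([] : List String) (· ++ [q.2]))
        (ranking.foldl (fun d x => d.insert x ([] : List String)) PySem.Dict.empty) :=
    pv_foldl_pairs (fun d q => d.modify q.1 ([] : List String) (· ++ [q.2]))
      (fun (d : PySem.Dict String (List String)) p =>
        (d.modify p.1 ([] : List String) (· ++ [p.2])).modify p.2 [] (· ++ [p.1]))
      (fun _ _ => rfl) rels _
  rw [step1, PySem.Dict.getD_foldl_modify_append, pv_adj_base e ranking PySem.Dict.empty rfl]
  rfl

-- SELECTION: A's max by (count, -index) over candidates equals the index-minimal candidate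
theorem pv_selectA (rels : List (String × String)) (cand : List String) (m : String)
    (hsub : ∀ e ∈ cand, e ∈ pvRanking rels)
    (h : PySem.List.max2? cand (fun e => (pvCount rels).getD e 0)
        (fun e => -((pvIdx (pvRanking rels) e : Nat) : Int)) = some m) :
    m ∈ cand ∧ ∀ y ∈ cand, pvIdx (pvRanking rels) m ≤ pvIdx (pvRanking rels) y := by
  have hmem := pv_max2_mem _ _ _ _ h
  have hmax := pv_max2_isMax _ _ _ _ h
  refine ⟨hmem, fun y hy => ?_⟩
  rcases hmax y hy with hlt | ⟨_, hneg⟩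
  · by_contra hcon
    have hyx : pvIdx (pvRanking rels) y < pvIdx (pvRanking rels) m := by omega
    have := pv_idx_lt_count rels y m (hsub y hy) (hsub m hmem) hyx
    omega
  · omega

-- uniqueness of the index-minimal candidate
theorem pv_pick_unique (rels : List (String × String)) (cand : List String) (m₁ m₂ : String)
    (hsub : ∀ e ∈ cand, e ∈ pvRanking rels)
    (h₁ : m₁ ∈ cand ∧ ∀ y ∈ cand, pvIdx (pvRanking rels) m₁ ≤ pvIdx (pvRanking rels) y)
    (h₂ : m₂ ∈ cand ∧ ∀ y ∈ cand, pvIdx (pvRanking rels) m₂ ≤ pvIdx (pvRanking rels) y) :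
    m₁ = m₂ := by
  obtain ⟨hm1, ha1⟩ := h₁
  obtain ⟨hm2, ha2⟩ := h₂
  exact pv_idx_inj _ (pv_ranking_nodup rels) _ _ (hsub _ hm1) (hsub _ hm2)
    (le_antisymm (ha1 _ hm2) (ha2 _ hm1))

-- A's guarded-append scan and B's Set.update keep the unvisited parts of the frontiers equal
theorem pv_fold_filter_eq (p g : String → Bool) (L fA fB : List String)
    (hg : ∀ t, p t = true → g t = true)
    (h : fA.filter p = fB.filter p) :
    (L.foldl (fun f t => if !f.contains t && g t then f ++ [t] else f) fA).filter p
      = (L.foldl PySem.Set.add fB).filter p := by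
  induction L generalizing fA fB with
  | nil => exact h
  | cons t L' ih =>
    rw [List.foldl_cons, List.foldl_cons]
    apply ih
    by_cases hp : p t = true
    · have hmemiff : (t ∈ fA) ↔ (t ∈ fB) := by
        constructor <;> intro hmem
        · have hin : t ∈ fB.filter p := h ▸ List.mem_filter.mpr ⟨hmem, hp⟩
          exact (List.mem_filter.mp hin).1
        · have hin : t ∈ fA.filter p := h.symm ▸ List.mem_filter.mpr ⟨hmem, hp⟩
          exact (List.mem_filter.mp hin).1
      by_cases hmem : t ∈ fA
      · have hA : fA.contains t = true := List.contains_iff_mem.mpr hmem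
        have hB : PySem.Set.contains fB t = true := List.contains_iff_mem.mpr (hmemiff.mp hmem)
        rw [if_neg (by rw [hA]; simp), PySem.Set.add, if_pos hB]
        exact h
      · have hA : fA.contains t = false := by
          rw [Bool.eq_false_iff]; intro hcon; exact hmem (List.contains_iff_mem.mp hcon)
        have hB : PySem.Set.contains fB t = false := by
          rw [Bool.eq_false_iff]; intro hcon; exact hmem (hmemiff.mpr (List.contains_iff_mem.mp hcon))
        rw [if_pos (by rw [hA, hg t hp]; rfl), PySem.Set.add, if_neg (by rw [hB]; simp)]
        rw [List.filter_append, List.filter_append, h]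
    · have hp' : p t = false := Bool.eq_false_iff.mpr hp
      rw [PySem.Set.add]
      split_ifs <;> simp [List.filter_append, hp', h]

theorem pv_foldA_nodup (D : List String → String → Bool)
    (hD : ∀ f t, D f t = true → f.contains t = false) (L fA : List String) (h : fA.Nodup) :
    (L.foldl (fun f t => if D f t then f ++ [t] else f) fA).Nodup := by
  induction L generalizing fA with
  | nil => exact h
  | cons t L' ih =>
    rw [List.foldl_cons]
    apply ih
    split_ifs with hc
    · have hni : t ∉ fA := fun hm => by
        have h1 : fA.contains t = true := List.contains_iff_mem.mpr hm
        rw [hD fA t hc] at h1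
        exact absurd h1 (by simp)
      simp only [List.nodup_append]
      refine ⟨h, List.nodup_singleton t, ?_⟩
      intro a ha b hb heq
      rw [List.mem_singleton.mp hb] at heq
      exact hni (heq ▸ ha)
    · exact h

theorem pv_foldA_subset (R : List String) (D : List String → String → Bool) (L fA : List String)
    (hL : ∀ t ∈ L, t ∈ R) (h : ∀ t ∈ fA, t ∈ R) :
    ∀ t ∈ L.foldl (fun f t => if D f t then f ++ [t] else f) fA, t ∈ R := by
  induction L generalizing fA with
  | nil => exact h
  | cons t L' ih =>
    rw [List.foldl_cons]
    apply ih
    · intro u hu; exact hL u (List.mem_cons.mpr (Or.inr hu))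
    · split_ifs with hc
      · intro u hu
        rcases List.mem_append.mp hu with hu | hu
        · exact h u hu
        · rw [List.mem_singleton.mp hu]; exact hL t (List.mem_cons.mpr (Or.inl rfl))
      · exact h

theorem pv_scan_aux (nxt : String) (C : List String → String → Bool) :
    ∀ (L : List (String × String)) (fr : List String),
      L.foldl (fun f q => if q.1 == nxt && C f q.2 then f ++ [q.2] else f) fr
        = ((L.filter (fun q => q.1 == nxt)).map (·.2)).foldl
            (fun f t => if C f t then f ++ [t] else f) fr := by
  intro L
  induction L with
  | nil => intro fr; rfl
  | cons q T ih =>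
    intro fr
    by_cases hq : (q.1 == nxt) = true
    · simp only [List.foldl_cons, List.filter_cons, hq, if_true, List.map_cons, Bool.true_and]
      rw [ih]
    · have hq' : (q.1 == nxt) = false := Bool.eq_false_iff.mpr hq
      simp only [List.foldl_cons, List.filter_cons, hq', Bool.false_and, Bool.false_eq_true,
        if_false]
      rw [ih]

theorem pv_scan_eq (rels : List (String × String)) (nxt : String) (C : List String → String → Bool)
    (fr : List String) :
    rels.foldl (fun f p =>
        let f := if p.1 == nxt && C f p.2 then f ++ [p.2] else f
        if p.2 == nxt && C f p.1 then f ++ [p.1] else f) fr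
      = (pvAdjSeq rels nxt).foldl (fun f t => if C f t then f ++ [t] else f) fr := by
  have step1 : rels.foldl (fun f p =>
        let f := if p.1 == nxt && C f p.2 then f ++ [p.2] else f
        if p.2 == nxt && C f p.1 then f ++ [p.1] else f) fr
      = (pvFlat rels).foldl (fun f q => if q.1 == nxt && C f q.2 then f ++ [q.2] else f) fr :=
    pv_foldl_pairs (fun f q => if q.1 == nxt && C f q.2 then f ++ [q.2] else f)
      (fun f p =>
        let f := if p.1 == nxt && C f p.2 then f ++ [p.2] else f
        if p.2 == nxt && C f p.1 then f ++ [p.1] else f)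
      (fun _ _ => rfl) rels fr
  rw [step1]
  exact pv_scan_aux nxt C (pvFlat rels) fr

-- the main loop equivalence

def pvRankD (rels : List (String × String)) : PySem.Dict String Int :=
  (PySem.List.enumerate (pvRanking rels)).foldl (fun d p => d.insert p.2 p.1) PySem.Dict.empty

def pvAdjD (rels : List (String × String)) : PySem.Dict String (List String) :=
  rels.foldl (fun d p =>
      (d.modify p.1 ([] : List String) (· ++ [p.2])).modify p.2 [] (· ++ [p.1]))
    ((pvRanking rels).foldl (fun d x => d.insert x ([] : List String)) PySem.Dict.empty)

theorem pv_rankD_getD (rels : List (String × String)) (e : String) (he : e ∈ pvRanking rels) :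
    (pvRankD rels).getD e 0 = (pvIdx (pvRanking rels) e : Int) :=
  pv_rank_getD (pvRanking rels) (pv_ranking_nodup rels) e he

theorem pv_adjD_getD (rels : List (String × String)) (e : String) :
    (pvAdjD rels).getD e [] = pvAdjSeq rels e :=
  pv_adj_getD rels (pvRanking rels) e

theorem pv_filter_snoc (l order : List String) (m : String) :
    l.filter (fun e => !(order ++ [m]).contains e)
      = (l.filter (fun e => !order.contains e)).filter (fun e => !(e == m)) := by
  rw [List.filter_filter]
  apply List.filter_congr
  intro e _
  by_cases hem : e = m <;> by_cases horder : e ∈ order <;>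
    simp [List.contains_append, hem, horder]

theorem pv_select_fallback (rels : List (String × String)) (p : String → Bool) (m : String)
    (rest : List String) (hf : (pvRanking rels).filter p = m :: rest) :
    PySem.List.max2? ((pvRanking rels).filter p) (fun e => (pvCount rels).getD e 0)
      (fun e => -((pvIdx (pvRanking rels) e : Nat) : Int)) = some m := by
  have hsub : ∀ e ∈ (pvRanking rels).filter p, e ∈ pvRanking rels :=
    fun e he => (List.mem_filter.mp he).1
  have hne : (pvRanking rels).filter p ≠ [] := by rw [hf]; simp
  cases hmax : PySem.List.max2? ((pvRanking rels).filter p) (fun e => (pvCount rels).getD e 0)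
      (fun e => -((pvIdx (pvRanking rels) e : Nat) : Int)) with
  | none => exact absurd hmax (pv_max2_ne_none _ _ _ hne)
  | some m₁ =>
    have hA := pv_selectA rels _ m₁ hsub hmax
    have hpw : ((pvRanking rels).filter p).Pairwise
        (fun a b => pvIdx (pvRanking rels) a < pvIdx (pvRanking rels) b) :=
      List.Pairwise.sublist List.filter_sublist (pv_idx_pairwise _ (pv_ranking_nodup rels))
    have hmmin : ∀ y ∈ (pvRanking rels).filter p,
        pvIdx (pvRanking rels) m ≤ pvIdx (pvRanking rels) y := by
      intro y hy
      rw [hf] at hy hpw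
      rcases List.mem_cons.mp hy with rfl | hy'
      · exact le_refl _
      · exact ((List.pairwise_cons.mp hpw).1 y hy').le
    have hmmem : m ∈ (pvRanking rels).filter p := by rw [hf]; exact List.mem_cons_self
    rw [pv_pick_unique rels _ m₁ m hsub hA ⟨hmmem, hmmin⟩]

-- one-step equations for the two loops
theorem pvLoopA_step (rels : List (String × String)) (count : PySem.Dict String Int)
    (ranking : List String) (order frontier : List String)
    (h : order.length < ranking.length) :
    pvLoopA rels count ranking order frontier
      = (match PySem.List.max2?
          (if (frontier.filter (fun e => !order.contains e)).isEmpty = true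
           then ranking.filter (fun e => !order.contains e)
           else frontier.filter (fun e => !order.contains e))
          (fun e => count.getD e 0)
          (fun e => -(((PySem.List.index? ranking e).getD 0 : Nat) : Int)) with
        | none => order
        | some nxt =>
          pvLoopA rels count ranking (order ++ [nxt])
            (rels.foldl (fun f p =>
              let f := if p.1 == nxt && !f.contains p.2 && !(order ++ [nxt]).contains p.2
                       then f ++ [p.2] else f
              if p.2 == nxt && !f.contains p.1 && !(order ++ [nxt]).contains p.1
              then f ++ [p.1] else f) frontier)) := by
  rw [pvLoopA.eq_def, dif_pos h]

theorem pvLoopA_eqnone (rels : List (String × String)) (count : PySem.Dict String Int)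
    (ranking : List String) (order frontier : List String)
    (h : order.length < ranking.length)
    (hsel : PySem.List.max2?
        (if (frontier.filter (fun e => !order.contains e)).isEmpty = true
         then ranking.filter (fun e => !order.contains e)
         else frontier.filter (fun e => !order.contains e))
        (fun e => count.getD e 0)
        (fun e => -(((PySem.List.index? ranking e).getD 0 : Nat) : Int)) = none) :
    pvLoopA rels count ranking order frontier = order := by
  rw [pvLoopA_step rels count ranking order frontier h, hsel]

theorem pvLoopA_eqsome (rels : List (String × String)) (count : PySem.Dict String Int)
    (ranking : List String) (order frontier : List String) (nxt : String)
    (h : order.length < ranking.length)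
    (hsel : PySem.List.max2?
        (if (frontier.filter (fun e => !order.contains e)).isEmpty = true
         then ranking.filter (fun e => !order.contains e)
         else frontier.filter (fun e => !order.contains e))
        (fun e => count.getD e 0)
        (fun e => -(((PySem.List.index? ranking e).getD 0 : Nat) : Int)) = some nxt) :
    pvLoopA rels count ranking order frontier
      = pvLoopA rels count ranking (order ++ [nxt])
          (rels.foldl (fun f p =>
            let f := if p.1 == nxt && !f.contains p.2 && !(order ++ [nxt]).contains p.2
                     then f ++ [p.2] else f
            if p.2 == nxt && !f.contains p.1 && !(order ++ [nxt]).contains p.1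
            then f ++ [p.1] else f) frontier) := by
  rw [pvLoopA_step rels count ranking order frontier h, hsel]

theorem pvLoopB_step (rank : PySem.Dict String Int) (adj : PySem.Dict String (List String))
    (ranking : List String) (k : Nat) (order : List String)
    (visited frontier : PySem.Set String) :
    pvLoopB rank adj ranking (k + 1) order visited frontier
      = (match (if (PySem.Set.diff frontier visited).isEmpty = true
                then ranking.find? (fun e => !(PySem.Set.contains visited e))
                else PySem.List.min? (PySem.Set.diff frontier visited)
                      (fun e => rank.getD e 0)) with
         | none => order
         | some nxt =>
           pvLoopB rank adj ranking k (order ++ [nxt]) (PySem.Set.add visited nxt)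
             (PySem.Set.update frontier (adj.getD nxt []))) := rfl

theorem pvLoopB_eqnone (rank : PySem.Dict String Int) (adj : PySem.Dict String (List String))
    (ranking : List String) (k : Nat) (order : List String)
    (visited frontier : PySem.Set String)
    (hsel : (if (PySem.Set.diff frontier visited).isEmpty = true
             then ranking.find? (fun e => !(PySem.Set.contains visited e))
             else PySem.List.min? (PySem.Set.diff frontier visited)
                   (fun e => rank.getD e 0)) = none) :
    pvLoopB rank adj ranking (k + 1) order visited frontier = order := by
  rw [pvLoopB_step, hsel]

theorem pvLoopB_eqsome (rank : PySem.Dict String Int) (adj : PySem.Dict String (List String))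
    (ranking : List String) (k : Nat) (order : List String)
    (visited frontier : PySem.Set String) (nxt : String)
    (hsel : (if (PySem.Set.diff frontier visited).isEmpty = true
             then ranking.find? (fun e => !(PySem.Set.contains visited e))
             else PySem.List.min? (PySem.Set.diff frontier visited)
                   (fun e => rank.getD e 0)) = some nxt) :
    pvLoopB rank adj ranking (k + 1) order visited frontier
      = pvLoopB rank adj ranking k (order ++ [nxt]) (PySem.Set.add visited nxt)
          (PySem.Set.update frontier (adj.getD nxt [])) := by
  rw [pvLoopB_step, hsel]

-- the common continuation after both loops picked the same next entity
theorem pv_loop_tail (rels : List (String × String)) (k : Nat)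
    (ih : ∀ (order fA fB : List String),
      order.length + k = (pvRanking rels).length →
      order.Nodup → (∀ e ∈ order, e ∈ pvRanking rels) →
      fA.Nodup → (∀ e ∈ fA, e ∈ pvRanking rels) →
      fA.filter (fun e => !order.contains e) = fB.filter (fun e => !order.contains e) →
      pvLoopA rels (pvCount rels) (pvRanking rels) order fA
        = pvLoopB (pvRankD rels) (pvAdjD rels) (pvRanking rels) k order order fB)
    (order fA fB : List String) (nxt : String)
    (hk : order.length + (k + 1) = (pvRanking rels).length)
    (hnd : order.Nodup) (hsub : ∀ e ∈ order, e ∈ pvRanking rels)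
    (hfnd : fA.Nodup) (hfsub : ∀ e ∈ fA, e ∈ pvRanking rels)
    (hfe : fA.filter (fun e => !order.contains e) = fB.filter (fun e => !order.contains e))
    (hmR : nxt ∈ pvRanking rels) (hmp : (!order.contains nxt) = true) :
    pvLoopA rels (pvCount rels) (pvRanking rels) (order ++ [nxt])
        (rels.foldl (fun f p =>
          let f := if p.1 == nxt && !f.contains p.2 && !(order ++ [nxt]).contains p.2
                   then f ++ [p.2] else f
          if p.2 == nxt && !f.contains p.1 && !(order ++ [nxt]).contains p.1
          then f ++ [p.1] else f) fA)
      = pvLoopB (pvRankD rels) (pvAdjD rels) (pvRanking rels) k (order ++ [nxt])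
          (PySem.Set.add order nxt) (PySem.Set.update fB ((pvAdjD rels).getD nxt [])) := by
  have hcont : order.contains nxt = false := by simpa using hmp
  have hnin : nxt ∉ order := fun hm => by
    rw [List.contains_iff_mem.mpr hm] at hcont
    exact absurd hcont (by simp)
  have hadd : PySem.Set.add order nxt = order ++ [nxt] := by
    rw [PySem.Set.add, if_neg (by rw [show PySem.Set.contains order nxt = order.contains nxt from rfl, hcont]; simp)]
  rw [hadd, pv_adjD_getD rels nxt]
  have hscan : rels.foldl (fun f p =>
        let f := if p.1 == nxt && !f.contains p.2 && !(order ++ [nxt]).contains p.2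
                 then f ++ [p.2] else f
        if p.2 == nxt && !f.contains p.1 && !(order ++ [nxt]).contains p.1
        then f ++ [p.1] else f) fA
      = (pvAdjSeq rels nxt).foldl
          (fun f t => if !f.contains t && !(order ++ [nxt]).contains t then f ++ [t] else f) fA := by
    have h2 := pv_scan_eq rels nxt (fun f t => !f.contains t && !(order ++ [nxt]).contains t) fA
    simp only [Bool.and_assoc]
    exact h2
  rw [hscan]
  rw [show PySem.Set.update fB (pvAdjSeq rels nxt)
      = (pvAdjSeq rels nxt).foldl PySem.Set.add fB from rfl]
  apply ih
  · simp only [List.length_append, List.length_cons, List.length_nil]; omega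
  · simp only [List.nodup_append]
    refine ⟨hnd, List.nodup_singleton nxt, ?_⟩
    intro a ha b hb heq
    rw [List.mem_singleton.mp hb] at heq
    exact hnin (heq ▸ ha)
  · intro e he
    rcases List.mem_append.mp he with h | h
    · exact hsub e h
    · rw [List.mem_singleton.mp h]; exact hmR
  · exact pv_foldA_nodup _
      (fun f t ht => by
        simp only [Bool.and_eq_true, Bool.not_eq_true'] at ht
        exact ht.1) _ _ hfnd
  · exact pv_foldA_subset (pvRanking rels) _ _ _
      (fun t ht => pv_adjseq_mem_ranking rels nxt t ht) hfsub
  · have hbase : fA.filter (fun e => !(order ++ [nxt]).contains e)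
        = fB.filter (fun e => !(order ++ [nxt]).contains e) := by
      rw [pv_filter_snoc fA order nxt, pv_filter_snoc fB order nxt, hfe]
    exact pv_fold_filter_eq (fun e => !(order ++ [nxt]).contains e)
      (fun e => !(order ++ [nxt]).contains e) _ _ _ (fun t ht => ht) hbase

theorem pv_loop_eq (rels : List (String × String)) (k : Nat) :
    ∀ (order fA fB : List String),
      order.length + k = (pvRanking rels).length →
      order.Nodup → (∀ e ∈ order, e ∈ pvRanking rels) →
      fA.Nodup → (∀ e ∈ fA, e ∈ pvRanking rels) →
      fA.filter (fun e => !order.contains e) = fB.filter (fun e => !order.contains e) →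
      pvLoopA rels (pvCount rels) (pvRanking rels) order fA
        = pvLoopB (pvRankD rels) (pvAdjD rels) (pvRanking rels) k order order fB := by
  induction k with
  | zero =>
    intro order fA fB hk _ _ _ _ _
    rw [pvLoopA.eq_def, dif_neg (by omega)]
    rfl
  | succ k ih =>
    intro order fA fB hk hnd hsub hfnd hfsub hfe
    have hlt : order.length < (pvRanking rels).length := by omega
    have hdiff : PySem.Set.diff fB order = fB.filter (fun e => !order.contains e) := rfl
    by_cases hemp : (fA.filter (fun e => !order.contains e)).isEmpty = true
    · -- frontier has no unvisited candidate: both fall back to the ranking order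
      have hBfind : (pvRanking rels).find? (fun e => !(PySem.Set.contains order e))
          = ((pvRanking rels).filter (fun e => !order.contains e)).head? := by
        rw [List.head?_filter]
        rfl
      cases hfil : (pvRanking rels).filter (fun e => !order.contains e) with
      | nil =>
        have hselA : PySem.List.max2?
            (if (fA.filter (fun e => !order.contains e)).isEmpty = true
             then (pvRanking rels).filter (fun e => !order.contains e)
             else fA.filter (fun e => !order.contains e))
            (fun e => (pvCount rels).getD e 0)
            (fun e => -(((PySem.List.index? (pvRanking rels) e).getD 0 : Nat) : Int)) = none := by
          rw [if_pos hemp, hfil]; rfl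
        have hselB : (if (PySem.Set.diff fB order).isEmpty = true
            then (pvRanking rels).find? (fun e => !(PySem.Set.contains order e))
            else PySem.List.min? (PySem.Set.diff fB order)
                  (fun e => (pvRankD rels).getD e 0)) = none := by
          rw [hdiff, ← hfe, if_pos hemp, hBfind, hfil]
          rfl
        rw [pvLoopA_eqnone rels (pvCount rels) (pvRanking rels) order fA hlt hselA,
          pvLoopB_eqnone (pvRankD rels) (pvAdjD rels) (pvRanking rels) k order order fB hselB]
      | cons m rest =>
        have hmfil : m ∈ (pvRanking rels).filter (fun e => !order.contains e) := by
          rw [hfil]; exact List.mem_cons_self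
        have hmR : m ∈ pvRanking rels := (List.mem_filter.mp hmfil).1
        have hmp : (!order.contains m) = true := (List.mem_filter.mp hmfil).2
        have hmax0 := pv_select_fallback rels (fun e => !order.contains e) m rest hfil
        have hselA : PySem.List.max2?
            (if (fA.filter (fun e => !order.contains e)).isEmpty = true
             then (pvRanking rels).filter (fun e => !order.contains e)
             else fA.filter (fun e => !order.contains e))
            (fun e => (pvCount rels).getD e 0)
            (fun e => -(((PySem.List.index? (pvRanking rels) e).getD 0 : Nat) : Int)) = some m := by
          rw [if_pos hemp]; exact hmax0
        have hselB : (if (PySem.Set.diff fB order).isEmpty = true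
            then (pvRanking rels).find? (fun e => !(PySem.Set.contains order e))
            else PySem.List.min? (PySem.Set.diff fB order)
                  (fun e => (pvRankD rels).getD e 0)) = some m := by
          rw [hdiff, ← hfe, if_pos hemp, hBfind, hfil]
          rfl
        rw [pvLoopA_eqsome rels (pvCount rels) (pvRanking rels) order fA m hlt hselA,
          pvLoopB_eqsome (pvRankD rels) (pvAdjD rels) (pvRanking rels) k order order fB m hselB]
        exact pv_loop_tail rels k ih order fA fB m hk hnd hsub hfnd hfsub hfe hmR hmp
    · -- frontier candidates nonempty: A's max by (count, -rank) = B's min by rank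
      have hne : fA.filter (fun e => !order.contains e) ≠ [] := by
        intro hcon
        exact hemp (by rw [hcon]; rfl)
      obtain ⟨m₁, hmax⟩ : ∃ m₁, PySem.List.max2? (fA.filter (fun e => !order.contains e))
          (fun e => (pvCount rels).getD e 0)
          (fun e => -(((PySem.List.index? (pvRanking rels) e).getD 0 : Nat) : Int)) = some m₁ := by
        cases hm : PySem.List.max2? (fA.filter (fun e => !order.contains e))
            (fun e => (pvCount rels).getD e 0)
            (fun e => -(((PySem.List.index? (pvRanking rels) e).getD 0 : Nat) : Int)) with
        | none => exact absurd hm (pv_max2_ne_none _ _ _ hne)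
        | some mm => exact ⟨mm, rfl⟩
      obtain ⟨m₂, hmin⟩ : ∃ m₂, PySem.List.min? (fA.filter (fun e => !order.contains e))
          (fun e => (pvRankD rels).getD e 0) = some m₂ := by
        cases hm : PySem.List.min? (fA.filter (fun e => !order.contains e))
            (fun e => (pvRankD rels).getD e 0) with
        | none => exact absurd hm (pv_min_ne_none _ _ hne)
        | some mm => exact ⟨mm, rfl⟩
      have hsubc : ∀ e ∈ fA.filter (fun e => !order.contains e), e ∈ pvRanking rels :=
        fun e he => hfsub e (List.mem_filter.mp he).1
      have hA := pv_selectA rels _ m₁ hsubc hmax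
      have hm₂R : m₂ ∈ pvRanking rels := hsubc m₂ (PySem.List.min?_mem hmin)
      have hB2 : ∀ y ∈ fA.filter (fun e => !order.contains e),
          pvIdx (pvRanking rels) m₂ ≤ pvIdx (pvRanking rels) y := by
        intro y hy
        have hle := PySem.List.min?_isMin hmin y hy
        rw [pv_rankD_getD rels m₂ hm₂R, pv_rankD_getD rels y (hsubc y hy)] at hle
        exact_mod_cast hle
      have hmm : m₁ = m₂ := pv_pick_unique rels _ m₁ m₂ hsubc hA ⟨PySem.List.min?_mem hmin, hB2⟩
      have hselA : PySem.List.max2?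
          (if (fA.filter (fun e => !order.contains e)).isEmpty = true
           then (pvRanking rels).filter (fun e => !order.contains e)
           else fA.filter (fun e => !order.contains e))
          (fun e => (pvCount rels).getD e 0)
          (fun e => -(((PySem.List.index? (pvRanking rels) e).getD 0 : Nat) : Int)) = some m₁ := by
        rw [if_neg hemp]; exact hmax
      have hselB : (if (PySem.Set.diff fB order).isEmpty = true
          then (pvRanking rels).find? (fun e => !(PySem.Set.contains order e))
          else PySem.List.min? (PySem.Set.diff fB order)
                (fun e => (pvRankD rels).getD e 0)) = some m₁ := by
        rw [hdiff, ← hfe, if_neg hemp, hmin, hmm]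
      rw [pvLoopA_eqsome rels (pvCount rels) (pvRanking rels) order fA m₁ hlt hselA,
        pvLoopB_eqsome (pvRankD rels) (pvAdjD rels) (pvRanking rels) k order order fB m₁ hselB]
      exact pv_loop_tail rels k ih order fA fB m₁ hk hnd hsub hfnd hfsub hfe
        (hsubc m₁ hA.1) (List.mem_filter.mp hA.1).2

-- ===== VERDICT (by name: the statement is the Claim_ definition above) =====
theorem build_entity_order_spec : Claim_equal_build_entity_order := by
  unfold Claim_equal_build_entity_order
  intro rels _
  unfold Spec_build_entity_order
  have h2 : build_entity_order_alt rels
      = pvLoopB (pvRankD rels) (pvAdjD rels) (pvRanking rels) (pvRanking rels).length [] [] [] := by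
    rfl
  cases hr : pvRanking rels with
  | nil =>
    have h1 : build_entity_order rels = pvLoopA rels (pvCount rels) (pvRanking rels) [] [] := by
      show (match pvRanking rels with
        | [] => pvLoopA rels (pvCount rels) (pvRanking rels) [] []
        | e0 :: _ =>
          pvLoopA rels (pvCount rels) (pvRanking rels) [e0]
            (rels.foldl (fun (f : List String) (p : String × String) =>
              let f := if p.1 == e0 && !f.contains p.2 then f ++ [p.2] else f
              if p.2 == e0 && !f.contains p.1 then f ++ [p.1] else f) [])) = _
      rw [hr]
    rw [h1, h2]
    exact pv_loop_eq rels (pvRanking rels).length [] [] [] (by simp) (by simp) (by simp)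
      (by simp) (by simp) rfl
  | cons e0 rest =>
    have h1 : build_entity_order rels = pvLoopA rels (pvCount rels) (pvRanking rels) [e0]
        (rels.foldl (fun f p =>
          let f := if p.1 == e0 && !f.contains p.2 then f ++ [p.2] else f
          if p.2 == e0 && !f.contains p.1 then f ++ [p.1] else f) []) := by
      show (match pvRanking rels with
        | [] => pvLoopA rels (pvCount rels) (pvRanking rels) [] []
        | e0 :: _ =>
          pvLoopA rels (pvCount rels) (pvRanking rels) [e0]
            (rels.foldl (fun (f : List String) (p : String × String) =>
              let f := if p.1 == e0 && !f.contains p.2 then f ++ [p.2] else f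
              if p.2 == e0 && !f.contains p.1 then f ++ [p.1] else f) [])) = _
      rw [hr]
    have hstepfun : (fun (f : List String) (t : String) => if !f.contains t then f ++ [t] else f)
        = (PySem.Set.add : PySem.Set String → String → PySem.Set String) := by
      funext f t
      by_cases hct : t ∈ f
      · have hc1 : f.contains t = true := List.contains_iff_mem.mpr hct
        rw [PySem.Set.add, if_pos (show PySem.Set.contains f t = true from hc1), hc1]
        rfl
      · have hc1 : f.contains t = false := by
          rw [Bool.eq_false_iff]; intro hcon; exact hct (List.contains_iff_mem.mp hcon)
        rw [PySem.Set.add, if_neg (show ¬ PySem.Set.contains f t = true from by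
          rw [show PySem.Set.contains f t = f.contains t from rfl, hc1]; simp), hc1]
        rfl
    have hinit : rels.foldl (fun f p =>
          let f := if p.1 == e0 && !f.contains p.2 then f ++ [p.2] else f
          if p.2 == e0 && !f.contains p.1 then f ++ [p.1] else f) []
        = PySem.Set.ofList (pvAdjSeq rels e0) := by
      rw [pv_scan_eq rels e0 (fun f t => !f.contains t) [], hstepfun,
        ← PySem.Set.update_nil_left (pvAdjSeq rels e0)]
      rfl
    rw [h1, h2, hinit]
    have hn : (pvRanking rels).length = rest.length + 1 := by rw [hr]; rfl
    rw [hn]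
    have hselB : (if (PySem.Set.diff ([] : PySem.Set String) ([] : PySem.Set String)).isEmpty = true
        then (pvRanking rels).find? (fun e => !(PySem.Set.contains ([] : PySem.Set String) e))
        else PySem.List.min? (PySem.Set.diff ([] : PySem.Set String) ([] : PySem.Set String))
              (fun e => (pvRankD rels).getD e 0)) = some e0 := by
      rw [hr]
      rfl
    rw [pvLoopB_eqsome (pvRankD rels) (pvAdjD rels) (pvRanking rels) rest.length [] [] [] e0 hselB]
    rw [show PySem.Set.add ([] : PySem.Set String) e0 = [e0] from rfl,
      show ([] : List String) ++ [e0] = [e0] from rfl,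
      pv_adjD_getD rels e0,
      PySem.Set.update_nil_left (pvAdjSeq rels e0)]
    apply pv_loop_eq rels rest.length [e0] (PySem.Set.ofList (pvAdjSeq rels e0))
      (PySem.Set.ofList (pvAdjSeq rels e0))
    · rw [hr]; simp only [List.length_cons, List.length_nil]; omega
    · exact List.nodup_singleton e0
    · intro e he
      rw [List.mem_singleton.mp he, hr]
      exact List.mem_cons_self
    · exact PySem.Set.nodup_ofList _
    · intro t ht
      exact pv_adjseq_mem_ranking rels e0 t ((PySem.Set.mem_ofList _ _).mp ht)
    · rfl
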